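-- pv_equiv track=rewrite | github.com/youngjaean/algorithm_practice | 프로그래머스/lv3/12987. 숫자 게임/숫자 게임.py | solution
-- ===== SOURCE A (Python) =====
-- from collections import deque
--
-- def solution(A, B):
--     A = deque(sorted(A))
--     B = deque(sorted(B))
--
--     answer = 0
--     while B:
--         if A[0] < B[0]:
--             A.popleft()
--             B.popleft()
--             answer += 1
--         else:
--             B.popleft()
--     return answer
-- ===== SOURCE B (Python) =====
-- def solution(A, B):
--     sa, sb = sorted(A), sorted(B)
--     # merge into one increasing event stream; B before A at equal values (a match needs a < b)
--     events = []
--     i = j = 0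
--     while i < len(sa) and j < len(sb):
--         if sb[j] <= sa[i]:
--             events.append('B')
--             j += 1
--         else:
--             events.append('A')
--             i += 1
--     events.extend('A' * (len(sa) - i))
--     events.extend('B' * (len(sb) - j))
--     answer = available = 0
--     for e in events:
--         if e == 'A':
--             available += 1
--         elif available:
--             answer += 1
--             available -= 1
--     return answer
-- ===== Notes on version B (the rewrite author's own statement) =====
-- stated objective: alternative
-- what changed: Replaces A's deque two-pointer matching (compare smallest unmatched A with each B, pop on match) with a merge of the two sorted lists into one tagged event stream swept once with an integer counter of available A-values.
import Mathlib
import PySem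

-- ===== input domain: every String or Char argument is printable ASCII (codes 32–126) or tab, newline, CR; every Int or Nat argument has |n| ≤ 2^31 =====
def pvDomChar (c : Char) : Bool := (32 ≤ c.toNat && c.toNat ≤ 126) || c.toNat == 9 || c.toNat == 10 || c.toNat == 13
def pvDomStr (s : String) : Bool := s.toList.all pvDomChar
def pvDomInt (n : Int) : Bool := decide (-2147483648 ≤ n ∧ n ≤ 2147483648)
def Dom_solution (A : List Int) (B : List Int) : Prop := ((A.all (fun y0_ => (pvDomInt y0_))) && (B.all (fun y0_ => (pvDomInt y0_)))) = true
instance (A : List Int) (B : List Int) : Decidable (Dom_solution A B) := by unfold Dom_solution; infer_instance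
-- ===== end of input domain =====

-- B replaces A's deque two-pointer matching with a merged event sweep driven by an integer
-- counter of available A-values (objective: alternative; same asymptotic cost).

-- ===== PORT A =====
-- the while loop of A: A/B are the sorted deques, ans the accumulator
def loopA : List Int → List Int → Int → Int
  | _, [], ans => ans
  | [], _ :: _, ans => ans   -- Python: A[0] raises IndexError here; excluded by Pre_solution
  | x :: xs, y :: ys, ans => if x < y then loopA xs ys (ans + 1) else loopA (x :: xs) ys ans

def solution (A : List Int) (B : List Int) : Int :=
  loopA (PySem.List.sorted A (fun v => v) false) (PySem.List.sorted B (fun v => v) false) 0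

-- ===== PORT B =====
-- Source B's first while loop plus the two extends: the merged tag stream ('B' first on ties)
def mergeTags : List Int → List Int → List Char
  | sa, [] => List.replicate sa.length 'A'
  | [], sb => List.replicate sb.length 'B'
  | x :: xs, y :: ys =>
      if y ≤ x then 'B' :: mergeTags (x :: xs) ys else 'A' :: mergeTags xs (y :: ys)

-- Source B's for loop over the events, with accumulators answer and available
def sweep : List Char → Int → Int → Int
  | [], ans, _ => ans
  | e :: es, ans, av =>
      if e = 'A' then sweep es ans (av + 1)
      else if av ≠ 0 then sweep es (ans + 1) (av - 1)
      else sweep es ans av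

def solution_alt (A : List Int) (B : List Int) : Int :=
  sweep (mergeTags (PySem.List.sorted A (fun v => v) false) (PySem.List.sorted B (fun v => v) false)) 0 0

-- ===== PRECONDITION & SPEC =====
-- Pre_ excludes exactly the inputs on which Python A raises IndexError (A[0] on the emptied
-- deque): B non-empty and, for every rank i, fewer B-elements ≤ the i-th smallest A-value than
-- would force the greedy match of that value to land on the last B element or fail.
def Pre_solution (A : List Int) (B : List Int) : Prop :=
  ¬ (B ≠ [] ∧ ∀ i < A.length,
      B.countP (fun b => decide (b ≤ (PySem.List.sorted A (fun v => v) false).getD i 0))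
        + A.length < B.length + i)
instance (A : List Int) (B : List Int) : Decidable (Pre_solution A B) := by
  unfold Pre_solution; infer_instance
def pvWitness_solution : List Int × List Int := ([1, 2], [2, 3])

def Spec_solution (A : List Int) (B : List Int) (out : Int) : Prop := out = solution_alt A B
instance (A : List Int) (B : List Int) (out : Int) : Decidable (Spec_solution A B out) := by unfold Spec_solution; infer_instance

-- ===== CLAIM (what is proved, stated in full; the proofs are below) =====
def Claim_equal_solution : Prop := ∀ (A : List Int) (B : List Int), Dom_solution A B → Pre_solution A B → Spec_solution A B (solution A B)

-- ===== LEMMAS AND PROOFS =====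

theorem loopA_acc (a b : List Int) (ans : Int) : loopA a b ans = ans + loopA a b 0 := by
  induction b generalizing a ans with
  | nil => simp [loopA]
  | cons y ys ih =>
    cases a with
    | nil => simp [loopA]
    | cons x xs =>
      simp only [loopA]
      split_ifs with h
      · have h1 := ih xs (ans + 1); have h2 := ih xs (0 + 1); omega
      · have h1 := ih (x :: xs) ans; have h2 := ih (x :: xs) 0; omega

theorem sweep_acc (es : List Char) (ans av : Int) : sweep es ans av = ans + sweep es 0 av := by
  induction es generalizing ans av with
  | nil => simp [sweep]
  | cons e t ih =>
    simp only [sweep]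
    split_ifs with h1 h2
    · have h1 := ih ans (av + 1); have h2 := ih 0 (av + 1); omega
    · have h1 := ih (ans + 1) (av - 1); have h2 := ih (0 + 1) (av - 1); omega
    · have h1 := ih ans av; have h2 := ih 0 av; omega

theorem sweep_repl_A (n : Nat) (ans av : Int) : sweep (List.replicate n 'A') ans av = ans := by
  induction n generalizing av with
  | zero => simp [sweep]
  | succ k ih => simp [List.replicate, sweep, ih]

theorem sweep_repl_B_zero (n : Nat) (ans : Int) : sweep (List.replicate n 'B') ans 0 = ans := by
  induction n with
  | zero => simp [sweep]
  | succ k ih => simp [List.replicate, sweep, ih]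

theorem mergeTags_nil (sb : List Int) : mergeTags [] sb = List.replicate sb.length 'B' := by
  cases sb <;> simp [mergeTags]

-- main invariant: m = already-arrived unmatched A-values (all below everything left in sb)
theorem main_inv (n : Nat) : ∀ (sa sb m : List Int), sa.length + sb.length = n →
    (∀ x ∈ m, ∀ y ∈ sb, x < y) → sb.Pairwise (· ≤ ·) →
    loopA (m ++ sa) sb 0 = sweep (mergeTags sa sb) 0 (m.length : Int) := by
  induction n using Nat.strong_induction_on with
  | _ n ih =>
    intro sa sb m hn hm hsb
    cases sb with
    | nil =>
      cases sa with
      | nil => simp [loopA, mergeTags, sweep]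
      | cons x xs => simp [loopA, mergeTags, sweep_repl_A]
    | cons y ys =>
      have hsb' : ys.Pairwise (· ≤ ·) := (List.pairwise_cons.mp hsb).2
      have hyys : ∀ y' ∈ ys, y ≤ y' := (List.pairwise_cons.mp hsb).1
      cases sa with
      | nil =>
        rw [mergeTags_nil]
        cases m with
        | nil => simp [loopA, sweep_repl_B_zero]
        | cons x ms =>
          have hx : x < y := hm x (by simp) y (by simp)
          have hstep : mergeTags [] (y :: ys) = 'B' :: List.replicate ys.length 'B' := by
            simp [mergeTags_nil, List.replicate]
          rw [← mergeTags_nil, hstep]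
          simp only [List.append_nil, loopA, if_pos hx, sweep]
          rw [if_neg (by decide), if_pos (by simp only [List.length_cons]; push_cast; omega), loopA_acc]
          have hrec := ih ys.length (by simp only [List.length_nil, List.length_cons] at hn; omega)
            [] ys ms (by simp)
            (fun a ha b hb => lt_of_lt_of_le (hm a (by simp [ha]) y (by simp)) (hyys b hb)) hsb'
          simp only [List.append_nil, mergeTags_nil] at hrec
          rw [hrec, sweep_acc (List.replicate ys.length 'B') (0 + 1)]
          have hl : ((x :: ms).length : Int) - 1 = (ms.length : Int) := by
            simp only [List.length_cons]; push_cast; ring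
          rw [hl]
      | cons x xs =>
        simp only [mergeTags]
        by_cases hbx : y ≤ x
        · -- B event
          rw [if_pos hbx]
          simp only [sweep, if_neg (by decide : ¬ ('B' = 'A'))]
          cases m with
          | nil =>
            rw [if_neg (by simp)]
            have hA : ¬ x < y := not_lt.mpr hbx
            simp only [List.nil_append, loopA, if_neg hA, List.length_nil]
            exact ih (xs.length + 1 + ys.length)
              (by simp only [List.length_cons] at hn; omega) (x :: xs) ys []
              rfl (by simp) hsb'
          | cons z ms =>
            have hz : z < y := hm z (by simp) y (by simp)
            rw [if_pos (by simp only [List.length_cons]; push_cast; omega)]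
            simp only [List.cons_append, loopA, if_pos hz]
            rw [loopA_acc]
            have hrec := ih (xs.length + 1 + ys.length)
              (by simp only [List.length_cons] at hn; omega) (x :: xs) ys ms rfl
              (fun a ha b hb => lt_of_lt_of_le (hm a (by simp [ha]) y (by simp)) (hyys b hb)) hsb'
            rw [hrec, sweep_acc (mergeTags (x :: xs) ys) (0 + 1)]
            have hl : ((z :: ms).length : Int) - 1 = (ms.length : Int) := by
              simp only [List.length_cons]; push_cast; ring
            rw [hl]
        · -- A event
          rw [if_neg hbx]
          have hx : x < y := lt_of_not_ge hbx
          have hmm : ∀ a ∈ m ++ [x], ∀ b ∈ y :: ys, a < b := by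
            intro a ha b hb
            rcases List.mem_append.mp ha with h | h
            · exact hm a h b hb
            · simp only [List.mem_singleton] at h; subst h
              rcases List.mem_cons.mp hb with h | h
              · omega
              · exact lt_of_lt_of_le hx (hyys b h)
          have hrec := ih (xs.length + (ys.length + 1))
            (by simp only [List.length_cons] at hn; omega) xs (y :: ys) (m ++ [x])
            (by simp) hmm hsb
          rw [show m ++ x :: xs = (m ++ [x]) ++ xs by simp]
          rw [hrec]
          have hl : ((m ++ [x]).length : Int) = (m.length : Int) + 1 := by
            simp
          rw [hl]
          simp [sweep]

-- ===== VERDICT (by name: the statement is the Claim_ definition above) =====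
theorem solution_spec : Claim_equal_solution := by
  intro A B _ _
  unfold Spec_solution solution solution_alt
  have h := main_inv ((PySem.List.sorted A (fun v => v) false).length +
      (PySem.List.sorted B (fun v => v) false).length)
    (PySem.List.sorted A (fun v => v) false) (PySem.List.sorted B (fun v => v) false) []
    rfl (by simp) (by simpa using PySem.List.sorted_pairwise B (fun v => v))
  simpa using h
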